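-- pv_equiv track=rewrite | github.com/TROLlox78/2015adventofcode | day 5/2015_naughtywordspart1.py | vaoulcheck
-- ===== SOURCE A (Python) =====
-- def vaoulcheck(word):
--     vauols = ['a', 'e', 'i', 'o', 'u']
--     vaoulcount=0
--     for i in word:
--         if i in vauols:
--             vaoulcount+=1
--     if vaoulcount >=3:
--         return 1
--     elif vaoulcount <3:
--         return 0
-- ===== SOURCE B (Python) =====
-- def vaoulcheck(word):
--     # tabulate all characters once, then index the five vowel keys
--     freq = {}
--     for c in word:
--         freq[c] = freq.get(c, 0) + 1
--     total = sum(freq.get(v, 0) for v in 'aeiou')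
--     return 1 if total >= 3 else 0
-- ===== Notes on version B (the rewrite author's own statement) =====
-- stated objective: idiomatic
-- what changed: B builds a full character-frequency table of the word in one pass, then sums the entries at the five vowel keys, instead of scanning the word testing each character for vowel membership.
import Mathlib
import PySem

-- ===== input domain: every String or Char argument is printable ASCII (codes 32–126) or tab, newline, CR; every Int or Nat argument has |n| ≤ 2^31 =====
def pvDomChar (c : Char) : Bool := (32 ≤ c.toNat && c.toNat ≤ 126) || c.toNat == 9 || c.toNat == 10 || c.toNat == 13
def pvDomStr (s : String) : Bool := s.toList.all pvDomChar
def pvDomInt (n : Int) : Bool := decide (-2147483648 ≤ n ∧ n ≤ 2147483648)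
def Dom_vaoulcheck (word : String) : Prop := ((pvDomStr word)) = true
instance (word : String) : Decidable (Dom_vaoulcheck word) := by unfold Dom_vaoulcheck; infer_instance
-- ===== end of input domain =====

-- B replaces the per-character vowel-membership scan by a one-pass character-frequency table indexed at the five vowel keys (idiomatic tabulate-then-lookup).


-- ===== PORT A =====
def vaoulcheck (word : String) : Int :=
  let vauols : List Char := ['a', 'e', 'i', 'o', 'u']
  let vaoulcount : Int :=
    word.toList.foldl (fun acc i => if i ∈ vauols then acc + 1 else acc) 0
  if vaoulcount ≥ 3 then 1 else 0

-- ===== PORT B =====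
def vaoulcheck_alt (word : String) : Int :=
  let freq : PySem.Dict Char Int :=
    word.toList.foldl (fun d c => d.insert c (d.getD c 0 + 1)) PySem.Dict.empty
  let total : Int := ("aeiou".toList.map (fun v => freq.getD v 0)).sum
  if total ≥ 3 then 1 else 0

-- ===== PRECONDITION & SPEC =====
def Spec_vaoulcheck (word : String) (out : Int) : Prop := out = vaoulcheck_alt word
instance (word : String) (out : Int) : Decidable (Spec_vaoulcheck word out) := by unfold Spec_vaoulcheck; infer_instance

-- ===== CLAIM (what is proved, stated in full; the proofs are below) =====
def Claim_equal_vaoulcheck : Prop := ∀ (word : String), Dom_vaoulcheck word → Spec_vaoulcheck word (vaoulcheck word)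

-- ===== LEMMAS AND PROOFS =====

-- sum of the 0/1 indicator of c over a duplicate-free list is 1 iff c is a member.
theorem pv_ind_sum (c : Char) (vs : List Char) (hn : vs.Nodup) :
    (vs.map (fun v => if v = c then (1:Int) else 0)).sum = if c ∈ vs then 1 else 0 := by
  induction vs with
  | nil => simp
  | cons x xs ih =>
    obtain ⟨hnx, hx⟩ := List.nodup_cons.mp hn
    by_cases hc : c = x
    · subst hc; simp [ih hx, hnx]
    · simp [Ne.symm hc, hc, ih hx]

-- A's membership-scan count equals the sum over the vowels of the character counts.
theorem pv_count_eq (vs : List Char) (hn : vs.Nodup) (w : List Char) :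
    (w.foldl (fun acc i => if i ∈ vs then acc + 1 else acc) (0 : Int))
      = (vs.map (fun v => (w.count v : Int))).sum := by
  induction w with
  | nil => simp
  | cons c w ih =>
    have step : ∀ (a : Int) (l : List Char),
        l.foldl (fun acc i => if i ∈ vs then acc + 1 else acc) a
          = a + l.foldl (fun acc i => if i ∈ vs then acc + 1 else acc) 0 := by
      intro a l
      induction l generalizing a with
      | nil => simp
      | cons x l ihl =>
        simp only [List.foldl_cons]
        rw [ihl, ihl (if x ∈ vs then (0:Int) + 1 else 0)]
        split_ifs <;> ring
    simp only [List.foldl_cons]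
    rw [step, ih]
    have hcount : ∀ v, (((c :: w).count v : Int))
        = (w.count v : Int) + (if v = c then 1 else 0) := by
      intro v
      by_cases h : v = c
      · subst h; simp [List.count_cons]
      · simp [List.count_cons, h, Ne.symm h]
    simp only [hcount]
    rw [List.sum_map_add, pv_ind_sum c vs hn]
    split_ifs <;> ring

-- the frequency table built by B's loop reports the character count of the word.
theorem pv_freq_getD (w : List Char) (v : Char) :
    ((w.foldl (fun d c => d.insert c (d.getD c 0 + 1)) (PySem.Dict.empty : PySem.Dict Char Int)).getD v 0)
      = (w.count v : Int) := by
  rw [PySem.Dict.foldl_insert_getD_add_one_eq_counter, PySem.Dict.getD_counter]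

-- ===== VERDICT (by name: the statement is the Claim_ definition above) =====
theorem vaoulcheck_spec : Claim_equal_vaoulcheck := by
  intro word _
  unfold Spec_vaoulcheck vaoulcheck vaoulcheck_alt
  simp only []
  rw [pv_count_eq ['a','e','i','o','u'] (by decide) word.toList]
  have : ("aeiou".toList.map (fun v =>
      ((word.toList.foldl (fun d c => d.insert c (d.getD c 0 + 1)) (PySem.Dict.empty : PySem.Dict Char Int)).getD v 0)))
      = ("aeiou".toList.map (fun v => (word.toList.count v : Int))) := by
    apply List.map_congr_left
    intro v _
    exact pv_freq_getD word.toList v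
  rw [this]
  rfl
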